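-- pv_equiv track=rewrite | github.com/Stiegemeierr/ELC123---Comunica-o-de-Dados | Trabalho1/codificadores.py | mlt_3
-- ===== SOURCE A (Python) =====
-- def mlt_3(bits: str) -> list[int]:
--     result = []
--     levels = [0, 1, 0, -1]
--     state_index = 0
--
--     for bit in bits:
--         if bit == '1':
--             state_index = (state_index + 1) % 4
--         result.append(levels[state_index])
--     return result
-- ===== SOURCE B (Python) =====
-- def mlt_3(bits: str) -> list[int]:
--     result = []
--     level = 0
--     sign = 1
--     for bit in bits:
--         if bit == '1':
--             if level == 0:
--                 level = sign
--                 sign = -sign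
--             else:
--                 level = 0
--         result.append(level)
--     return result
-- ===== Notes on version B (the rewrite author's own statement) =====
-- stated objective: idiomatic
-- what changed: Replaces the index into a fixed levels table with a level/sign state machine: on each '1', leave 0 with the current polarity and flip it, or return to 0; no levels array or modular index.
import Mathlib
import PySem

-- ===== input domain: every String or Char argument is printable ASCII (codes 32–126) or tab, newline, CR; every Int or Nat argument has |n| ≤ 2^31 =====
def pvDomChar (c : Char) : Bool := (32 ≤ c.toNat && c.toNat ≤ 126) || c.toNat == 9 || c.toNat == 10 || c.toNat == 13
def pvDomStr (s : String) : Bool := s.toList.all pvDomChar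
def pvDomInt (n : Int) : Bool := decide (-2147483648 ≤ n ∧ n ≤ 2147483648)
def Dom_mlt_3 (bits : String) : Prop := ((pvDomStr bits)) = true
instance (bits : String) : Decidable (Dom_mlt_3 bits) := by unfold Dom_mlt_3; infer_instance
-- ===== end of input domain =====

-- B replaces A's levels-table index with a level/sign state machine (idiomatic, same cost).


-- ===== PORT A =====
def mlt3Levels : List Int := [0, 1, 0, -1]

-- the loop of A: carries state_index; result built by appending levels[state_index]
def mlt3GoA : List Char → Nat → List Int
  | [], _ => []
  | c :: cs, i =>
    let i' := if c = '1' then (i + 1) % 4 else i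
    mlt3Levels.getD i' 0 :: mlt3GoA cs i'

def mlt_3 (bits : String) : List Int := mlt3GoA bits.toList 0

-- ===== PORT B =====
-- the loop of B: carries (level, sign)
def mlt3GoB : List Char → Int → Int → List Int
  | [], _, _ => []
  | c :: cs, level, sign =>
    if c = '1' then
      if level = 0 then sign :: mlt3GoB cs sign (-sign)
      else 0 :: mlt3GoB cs 0 sign
    else level :: mlt3GoB cs level sign

def mlt_3_alt (bits : String) : List Int := mlt3GoB bits.toList 0 1

-- ===== PRECONDITION & SPEC =====
def Spec_mlt_3 (bits : String) (out : List Int) : Prop := out = mlt_3_alt bits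
instance (bits : String) (out : List Int) : Decidable (Spec_mlt_3 bits out) := by unfold Spec_mlt_3; infer_instance

-- ===== CLAIM (what is proved, stated in full; the proofs are below) =====
def Claim_equal_mlt_3 : Prop := ∀ (bits : String), Dom_mlt_3 bits → Spec_mlt_3 bits (mlt_3 bits)

-- ===== LEMMAS AND PROOFS =====

-- invariant coupling A's index with B's (level, sign)
def mlt3Rel (i : Nat) (level sign : Int) : Prop :=
  (i = 0 ∧ level = 0 ∧ sign = 1) ∨ (i = 1 ∧ level = 1 ∧ sign = -1) ∨
  (i = 2 ∧ level = 0 ∧ sign = -1) ∨ (i = 3 ∧ level = -1 ∧ sign = 1)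

theorem mlt3Go_eq (cs : List Char) : ∀ (i : Nat) (level sign : Int),
    mlt3Rel i level sign → mlt3GoA cs i = mlt3GoB cs level sign := by
  induction cs with
  | nil => intro i l s _; rfl
  | cons c cs ih =>
    intro i l s h
    simp only [mlt3GoA, mlt3GoB]
    by_cases hc : c = '1' <;>
      rcases h with ⟨hi, hl, hs⟩ | ⟨hi, hl, hs⟩ | ⟨hi, hl, hs⟩ | ⟨hi, hl, hs⟩ <;>
      subst hi hl hs <;> simp [hc, mlt3Levels] <;>
      first
        | exact ih 1 1 (-1) (by simp [mlt3Rel])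
        | exact ih 2 0 (-1) (by simp [mlt3Rel])
        | exact ih 3 (-1) 1 (by simp [mlt3Rel])
        | exact ih 0 0 1 (by simp [mlt3Rel])

-- ===== VERDICT (by name: the statement is the Claim_ definition above) =====
theorem mlt_3_spec : Claim_equal_mlt_3 := by
  intro bits _
  unfold Spec_mlt_3 mlt_3 mlt_3_alt
  exact mlt3Go_eq bits.toList 0 0 1 (Or.inl ⟨rfl, rfl, rfl⟩)
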